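-- pv_equiv track=rewrite | github.com/NeverInMind/Tutorial | module-07/ex-09.py | all_sub_lists
-- ===== SOURCE A (Python) =====
-- def all_sub_lists(data):
--     new_list = [[]]
--     data_length = len(data)
--     if data_length <= 1:
--         return new_list
--     for item in range(0, len(data)):
--         while data_length != 0:
--             data_length -= 1
--             check_data = data[item:data_length+1]
--             if check_data != []:
--                 new_list.append(check_data)
--         data_length = len(data)
--     return sorted(new_list, key=len)
-- ===== SOURCE B (Python) =====
-- def all_sub_lists(data):
--     result = [[]]
--     n = len(data)
--     if n <= 1:
--         return result
--     for length in range(1, n + 1):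
--         for start in range(0, n - length + 1):
--             result.append(data[start:start + length])
--     return result
-- ===== Notes on version B (the rewrite author's own statement) =====
-- stated objective: simpler
-- what changed: B generates the sublists directly in length-major order (length 1..n, then start index), so the descending-length inner while loop and the final stable sort disappear.
import Mathlib
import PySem

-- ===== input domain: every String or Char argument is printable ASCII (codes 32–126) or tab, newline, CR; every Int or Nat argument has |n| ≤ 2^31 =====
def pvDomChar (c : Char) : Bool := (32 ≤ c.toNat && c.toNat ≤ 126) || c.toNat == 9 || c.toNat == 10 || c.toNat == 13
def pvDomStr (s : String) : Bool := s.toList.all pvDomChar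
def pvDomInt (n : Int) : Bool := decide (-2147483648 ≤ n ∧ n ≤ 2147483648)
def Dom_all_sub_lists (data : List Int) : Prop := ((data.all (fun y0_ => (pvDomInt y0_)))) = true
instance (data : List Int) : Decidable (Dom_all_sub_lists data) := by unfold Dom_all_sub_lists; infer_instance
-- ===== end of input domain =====

-- B replaces A's descending-length inner while loop plus final stable sort by directly
-- emitting the sublists in length-major order; no speed claim (objective: simpler).

-- ===== PORT A =====
-- the 'while data_length != 0' inner loop, recursing on data_length
def allSubWhileA (data : List Int) (item : Int) : Nat → List (List Int) → List (List Int)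
  | 0, acc => acc
  | d + 1, acc =>
      let check := PySem.List.slice data (some item) (some ((d : Int) + 1))
      allSubWhileA data item d (if check ≠ [] then acc ++ [check] else acc)

def all_sub_lists (data : List Int) : List (List Int) :=
  let new_list : List (List Int) := [[]]
  let data_length := data.length
  if (data_length : Int) ≤ 1 then new_list
  else
    let filled := (PySem.List.pyRange 0 (data.length : Int) 1).foldl
      (fun acc item => allSubWhileA data item data_length acc) new_list
    PySem.List.sorted filled (fun l => (l.length : Int)) false

-- ===== PORT B =====
def all_sub_lists_alt (data : List Int) : List (List Int) :=
  let n := data.length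
  if (n : Int) ≤ 1 then [[]]
  else
    (PySem.List.pyRange 1 ((n : Int) + 1) 1).foldl
      (fun acc L =>
        (PySem.List.pyRange 0 ((n : Int) - L + 1) 1).foldl
          (fun acc2 i => acc2 ++ [PySem.List.slice data (some i) (some (i + L))]) acc)
      [[]]

-- ===== PRECONDITION & SPEC =====
def Spec_all_sub_lists (data : List Int) (out : List (List Int)) : Prop := out = all_sub_lists_alt data
instance (data : List Int) (out : List (List Int)) : Decidable (Spec_all_sub_lists data out) := by unfold Spec_all_sub_lists; infer_instance

-- ===== CLAIM (what is proved, stated in full; the proofs are below) =====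
def Claim_equal_all_sub_lists : Prop := ∀ (data : List Int), Dom_all_sub_lists data → Spec_all_sub_lists data (all_sub_lists data)

-- ===== LEMMAS AND PROOFS =====

-- insertBy skips a prefix none of whose elements come after x
theorem insertBy_append_left {α : Type} (before : α → α → Bool) (x : α) (as bs : List α)
    (h : ∀ a ∈ as, before x a = false) :
    PySem.List.insertBy before x (as ++ bs) = as ++ PySem.List.insertBy before x bs := by
  induction as with
  | nil => rfl
  | cons a as ih =>
      simp only [List.cons_append, PySem.List.insertBy, h a (by simp)]
      simp only [Bool.false_eq_true, if_false, List.cons.injEq, true_and]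
      exact ih (fun a ha => h a (by simp [ha]))

-- insertBy puts x in front of a list all of whose elements come after x
theorem insertBy_front {α : Type} (before : α → α → Bool) (x : α) (bs : List α)
    (h : ∀ b ∈ bs, before x b = true) :
    PySem.List.insertBy before x bs = x :: bs := by
  cases bs with
  | nil => rfl
  | cons b bs => simp [PySem.List.insertBy, h b (by simp)]

-- stable sort by length = concatenation of the length-classes in increasing length order
theorem sorted_len_eq_flatMap (xs : List (List Int)) (N : Nat) (h : ∀ l ∈ xs, l.length ≤ N) :
    PySem.List.sorted xs (fun l => (l.length : Int)) false
      = (List.range (N + 1)).flatMap (fun L => xs.filter (fun l => l.length = L)) := by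
  rw [PySem.List.sorted_eq_foldl_insertBy]
  induction xs using List.reverseRecOn with
  | nil => simp
  | append_singleton xs x ih =>
      rw [List.foldl_append, List.foldl_cons, List.foldl_nil,
        ih (fun l hl => h l (by simp [hl]))]
      have hxN : x.length ≤ N := h x (by simp)
      rw [show N + 1 = (x.length + 1) + (N - x.length) from by omega, List.range_add]
      simp only [List.flatMap_append]
      rw [insertBy_append_left _ _ _ _ (by
        intro a ha
        simp only [List.mem_flatMap, List.mem_range, List.mem_filter] at ha
        obtain ⟨L, hL, _, halen⟩ := ha
        simp only [decide_eq_false_iff_not, not_lt]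
        have : a.length = L := by simpa using halen
        omega)]
      rw [insertBy_front _ _ _ (by
        intro b hb
        simp only [List.mem_flatMap, List.mem_map, List.mem_range, List.mem_filter] at hb
        obtain ⟨L, ⟨k, hk, hkL⟩, _, hblen⟩ := hb
        have : b.length = L := by simpa using hblen
        simp only [decide_eq_true_eq]
        omega)]
      rw [show List.range (x.length + 1) = List.range x.length ++ [x.length] from by
        simp [List.range_succ]]
      simp only [List.flatMap_append, List.append_assoc, List.flatMap_singleton]
      congr 1
      · apply List.flatMap_congr
        intro L hL
        simp only [List.mem_range] at hL
        rw [List.filter_append]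
        have hne : x.length ≠ L := by omega
        simp [List.filter, hne]
      · rw [List.filter_append]
        have hxx : (List.filter (fun l => decide (l.length = x.length)) [x]) = [x] := by
          simp [List.filter]
        rw [hxx]
        simp only [List.append_assoc, List.singleton_append]
        congr 1
        congr 1
        apply List.flatMap_congr
        intro L hL
        simp only [List.mem_map, List.mem_range] at hL
        obtain ⟨k, hk, hkL⟩ := hL
        rw [List.filter_append]
        have hne : x.length ≠ L := by omega
        simp [List.filter, hne]

-- the slices appended by A's inner while loop, in the order they are appended
def rowsA (data : List Int) (item : Int) : Nat → List (List Int)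
  | 0 => []
  | d + 1 =>
      (if PySem.List.slice data (some item) (some ((d : Int) + 1)) ≠ []
       then [PySem.List.slice data (some item) (some ((d : Int) + 1))] else [])
        ++ rowsA data item d

theorem allSubWhileA_eq_rows (data : List Int) (item : Int) (d : Nat) (acc : List (List Int)) :
    allSubWhileA data item d acc = acc ++ rowsA data item d := by
  induction d generalizing acc with
  | zero => simp [allSubWhileA, rowsA]
  | succ d ih =>
      simp only [allSubWhileA, rowsA, ih]
      split <;> simp

theorem filter_rowsA (data : List Int) (i d L : Nat) (hi : i < data.length)
    (hd : d ≤ data.length) (hL : 1 ≤ L) :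
    (rowsA data (i : Int) d).filter (fun l => l.length = L)
      = if i + L ≤ d then [(data.drop i).take L] else [] := by
  induction d with
  | zero => rw [if_neg (by omega)]; simp [rowsA]
  | succ d ih =>
      have hslice : PySem.List.slice data (some (i : Int)) (some ((d : Int) + 1))
          = (data.drop i).take (d + 1 - i) := by
        have : ((d : Int) + 1) = ((d + 1 : Nat) : Int) := by push_cast; ring
        rw [this, PySem.List.slice_natCast]
      rw [rowsA, List.filter_append, ih (by omega)]
      by_cases hid : i ≤ d
      · have hlentake : ((data.drop i).take (d + 1 - i)).length = d + 1 - i := by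
          simp; omega
        have hnonempty : (data.drop i).take (d + 1 - i) ≠ [] := by
          intro hcon
          rw [hcon] at hlentake
          simp at hlentake
          omega
        rw [hslice, if_pos hnonempty, List.filter_cons, List.filter_nil]
        by_cases hLd : i + L = d + 1
        · rw [show (decide (((data.drop i).take (d + 1 - i)).length = L)) = true from by
              simp only [hlentake, decide_eq_true_eq]; omega,
            if_pos rfl, if_neg (by omega), if_pos (by omega)]
          simp [show d + 1 - i = L from by omega]
        · rw [show (decide (((data.drop i).take (d + 1 - i)).length = L)) = false from by
              simp only [hlentake, decide_eq_false_iff_not]; omega,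
            if_neg (by simp)]
          by_cases hle : i + L ≤ d
          · rw [if_pos hle, if_pos (by omega)]
            simp
          · rw [if_neg hle, if_neg (by omega)]
            simp
      · have hz : d + 1 - i = 0 := by omega
        rw [hslice, hz]
        simp only [List.take_zero]
        rw [if_neg (by simp), if_neg (by omega), if_neg (by omega)]
        simp

-- the unsorted list A builds (without the leading [])
def bigU (data : List Int) : List (List Int) :=
  (List.range data.length).flatMap (fun i : Nat => rowsA data (i : Int) data.length)

theorem foldl_while_eq_bigU (data : List Int) :
    (PySem.List.pyRange 0 (data.length : Int) 1).foldl
        (fun acc item => allSubWhileA data item data.length acc) [[]]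
      = [] :: bigU data := by
  rw [PySem.List.pyRange_zero_nat]
  have key : ∀ (m : Nat) (acc : List (List Int)),
      ((List.range m).map (fun k : Nat => (k : Int))).foldl
          (fun acc item => allSubWhileA data item data.length acc) acc
        = acc ++ (List.range m).flatMap (fun i : Nat => rowsA data (i : Int) data.length) := by
    intro m
    induction m with
    | zero => simp
    | succ m ihm =>
        intro acc
        rw [List.range_succ, List.map_append, List.foldl_append]
        simp only [List.map_cons, List.map_nil, List.foldl_cons, List.foldl_nil]
        rw [ihm, allSubWhileA_eq_rows]
        simp [List.flatMap_append]
  rw [key data.length [[]]]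
  simp [bigU]

theorem rowsA_mem_length (data : List Int) (item : Int) (d : Nat) (l : List Int)
    (hl : l ∈ rowsA data item d) : 1 ≤ l.length ∧ l.length ≤ data.length := by
  induction d with
  | zero => simp [rowsA] at hl
  | succ d ih =>
      rw [rowsA] at hl
      rcases List.mem_append.mp hl with h1 | h2
      · by_cases hne : PySem.List.slice data (some item) (some ((d : Int) + 1)) ≠ []
        · rw [if_pos hne] at h1
          simp only [List.mem_singleton] at h1
          subst h1
          refine ⟨List.length_pos_iff.mpr hne, ?_⟩
          rw [PySem.List.length_slice]
          have := PySem.List.clampIdx_le data.length ((d : Int) + 1)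
          omega
        · rw [if_neg hne] at h1
          simp at h1
      · exact ih h2

theorem mem_bigU_length (data : List Int) (l : List Int) (hl : l ∈ bigU data) :
    1 ≤ l.length ∧ l.length ≤ data.length := by
  unfold bigU at hl
  simp only [List.mem_flatMap, List.mem_range] at hl
  obtain ⟨i, hi, hl⟩ := hl
  exact rowsA_mem_length data (i : Int) data.length l hl

-- filtering bigU at a fixed positive length L gives the slices of length L, start increasing
theorem filter_bigU (data : List Int) (L : Nat) (hL : 1 ≤ L) (hLn : L ≤ data.length) :
    (bigU data).filter (fun l => l.length = L)
      = (List.range (data.length - L + 1)).map (fun i => (data.drop i).take L) := by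
  unfold bigU
  rw [List.filter_flatMap]
  rw [List.flatMap_congr (fun i hi =>
    filter_rowsA data i data.length L (List.mem_range.mp hi) le_rfl hL)]
  rw [show data.length = (data.length - L + 1) + (L - 1) from by omega, List.range_add,
    List.flatMap_append]
  have h2 : ((List.range (L - 1)).map (fun x => data.length - L + 1 + x)).flatMap
      (fun i => if i + L ≤ data.length - L + 1 + (L - 1) then [(data.drop i).take L] else [])
        = [] := by
    apply List.flatMap_eq_nil_iff.mpr
    intro i hi
    simp only [List.mem_map, List.mem_range] at hi
    obtain ⟨k, hk, hki⟩ := hi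
    rw [if_neg (by omega)]
  rw [h2, List.append_nil]
  rw [List.flatMap_congr (fun i hi => by
    rw [if_pos (by have := List.mem_range.mp hi; omega)])]
  rw [show data.length - L + 1 + (L - 1) - L + 1 = data.length - L + 1 from by omega]
  exact List.map_eq_flatMap.symm

theorem all_sub_lists_spec' : ∀ (data : List Int),
    all_sub_lists data = all_sub_lists_alt data := by
  intro data
  unfold all_sub_lists all_sub_lists_alt
  by_cases h : (data.length : Int) ≤ 1
  · rw [if_pos h, if_pos h]
  · rw [if_neg h, if_neg h]
    simp only
    rw [foldl_while_eq_bigU]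
    rw [sorted_len_eq_flatMap ([] :: bigU data) data.length (by
      intro l hl
      rcases List.mem_cons.mp hl with rfl | hl
      · simp
      · exact (mem_bigU_length data l hl).2)]
    -- rewrite B's nested folds into a flatMap of maps
    have hinner : ∀ (L : Int) (acc : List (List Int)),
        (PySem.List.pyRange 0 ((data.length : Int) - L + 1) 1).foldl
            (fun acc2 i => acc2 ++ [PySem.List.slice data (some i) (some (i + L))]) acc
          = acc ++ (PySem.List.pyRange 0 ((data.length : Int) - L + 1) 1).map
              (fun i => PySem.List.slice data (some i) (some (i + L))) := by
      intro L acc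
      rw [PySem.List.foldl_append_eq_flatMap
        (fun i => [PySem.List.slice data (some i) (some (i + L))])]
      rw [← List.map_eq_flatMap]
    rw [show (fun (acc : List (List Int)) (L : Int) =>
          (PySem.List.pyRange 0 ((data.length : Int) - L + 1) 1).foldl
            (fun acc2 i => acc2 ++ [PySem.List.slice data (some i) (some (i + L))]) acc)
        = (fun (acc : List (List Int)) (L : Int) =>
          acc ++ (PySem.List.pyRange 0 ((data.length : Int) - L + 1) 1).map
              (fun i => PySem.List.slice data (some i) (some (i + L))))
      from funext fun acc => funext fun L => hinner L acc]
    rw [PySem.List.foldl_append_eq_flatMap]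
    -- both sides are now [] :: … / [[]] ++ … ; compare the flatMaps levelwise
    rw [List.range_succ_eq_map, List.flatMap_cons]
    have h0 : List.filter (fun l => decide (l.length = 0)) ([] :: bigU data) = [[]] := by
      rw [List.filter_cons]
      simp only [List.length_nil, decide_true]
      rw [List.filter_eq_nil_iff.mpr (by
        intro l hl
        have := (mem_bigU_length data l hl).1
        simp only [decide_eq_true_eq]
        omega)]
      rfl
    rw [h0]
    rw [PySem.List.pyRange_one 1 ((data.length : Int) + 1)]
    rw [show (((data.length : Int) + 1) - 1).toNat = data.length from by omega]
    rw [List.flatMap_map, List.flatMap_map]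
    simp only [List.cons_append, List.nil_append]
    congr 1
    apply List.flatMap_congr
    intro k hk
    have hkn : k < data.length := List.mem_range.mp hk
    -- left side: the filter of the class of length k+1
    rw [List.filter_cons]
    simp only [List.length_nil]
    rw [if_neg (by simp)]
    rw [filter_bigU data (k + 1) (by omega) (by omega)]
    -- right side: B's row for L = 1 + k
    rw [show (data.length : Int) - (1 + (k : Int)) + 1 = ((data.length - k : Nat) : Int) from by
      omega]
    rw [PySem.List.pyRange_zero_nat (data.length - k), List.map_map]
    rw [show data.length - (k + 1) + 1 = data.length - k from by omega]
    apply List.map_congr_left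
    intro i hi
    simp only [Function.comp]
    rw [show (1 : Int) + (k : Int) = ((1 + k : Nat) : Int) from by push_cast; ring]
    rw [PySem.List.slice_natCast_add data i (1 + k)]
    rw [show 1 + k = k + 1 from by omega]

-- ===== VERDICT (by name: the statement is the Claim_ definition above) =====
theorem all_sub_lists_spec : Claim_equal_all_sub_lists := by
  intro data _
  unfold Spec_all_sub_lists
  exact all_sub_lists_spec' data
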